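-- pv_equiv track=rewrite | github.com/h-spear/problem-solving-python | programmers/level2/tangerine.py | solution
-- ===== SOURCE A (Python) =====
-- from collections import Counter
--
-- def solution(k, tangerine):
--     answer = 0
--     for x in sorted(Counter(tangerine).values(), reverse=True):
--         if k > 0:
--             k -= x
--             answer += 1
--         else:
--             break
--
--     return answer
-- ===== SOURCE B (Python) =====
-- from collections import Counter
--
-- def solution(k, tangerine):
--     # Bucket (counting-sort) version: histogram of count-values walked from the
--     # largest count down, instead of comparison-sorting the counts.
--     counts = Counter(tangerine).values()
--     hist = Counter(counts)
--     mx = max(counts, default=0)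
--     answer = 0
--     for v in range(mx, 0, -1):
--         for _ in range(hist[v]):
--             if k <= 0:
--                 return answer
--             k -= v
--             answer += 1
--     return answer
-- ===== Notes on version B (the rewrite author's own statement) =====
-- stated objective: alternative
-- what changed: B replaces A's comparison sort of the Counter values by a counting-sort style bucket walk: a histogram Counter of the count-values is scanned from the maximum count down to 1, applying the same greedy step per kind.
import Mathlib
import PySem

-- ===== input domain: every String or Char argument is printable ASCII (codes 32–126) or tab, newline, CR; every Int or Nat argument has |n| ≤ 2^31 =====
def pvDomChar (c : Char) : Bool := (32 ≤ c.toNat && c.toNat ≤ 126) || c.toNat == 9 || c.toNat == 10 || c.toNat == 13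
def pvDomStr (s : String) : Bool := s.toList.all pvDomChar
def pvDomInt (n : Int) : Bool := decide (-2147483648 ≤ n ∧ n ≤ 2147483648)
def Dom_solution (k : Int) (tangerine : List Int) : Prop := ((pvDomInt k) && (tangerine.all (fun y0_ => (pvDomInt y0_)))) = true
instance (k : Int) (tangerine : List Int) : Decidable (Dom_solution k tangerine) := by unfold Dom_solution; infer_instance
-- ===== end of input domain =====

-- B replaces A's comparison sort of the Counter values by a count-histogram
-- (bucket) walk from the largest count downwards: an alternative, counting-sort
-- style algorithm producing the same greedy answer.

-- ===== PORT A =====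
-- the 'for x in …: if k > 0: … else: break' loop of A
def greedyA : Int → Int → List Int → Int
  | _, answer, [] => answer
  | k, answer, x :: rest => if k > 0 then greedyA (k - x) (answer + 1) rest else answer

def solution (k : Int) (tangerine : List Int) : Int :=
  greedyA k 0 (PySem.List.sorted (PySem.Dict.counter tangerine).values (fun x => x) true)

-- ===== PORT B =====
-- inner 'for _ in range(hist[v])' loop; first component true = early 'return answer'
def bInner : Nat → Int → Int → Int → Bool × Int × Int
  | 0, _, k, a => (false, k, a)
  | n + 1, v, k, a => if k ≤ 0 then (true, k, a) else bInner n v (k - v) (a + 1)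

-- outer 'for v in range(mx, 0, -1)' loop
def bOuter : List Int → PySem.Dict Int Int → Int → Int → Int
  | [], _, _, a => a
  | v :: vs, hist, k, a =>
    match bInner (hist.getD v 0).toNat v k a with
    | (true, _, a') => a'
    | (false, k', a') => bOuter vs hist k' a'

def solution_alt (k : Int) (tangerine : List Int) : Int :=
  let counts := (PySem.Dict.counter tangerine).values
  let hist := PySem.Dict.counter counts
  let mx := PySem.List.maxD counts (fun x => x) 0
  bOuter (PySem.List.pyRange mx 0 (-1)) hist k 0

-- ===== PRECONDITION & SPEC =====
def Spec_solution (k : Int) (tangerine : List Int) (out : Int) : Prop := out = solution_alt k tangerine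
instance (k : Int) (tangerine : List Int) (out : Int) : Decidable (Spec_solution k tangerine out) := by unfold Spec_solution; infer_instance

-- ===== CLAIM (what is proved, stated in full; the proofs are below) =====
def Claim_equal_solution : Prop := ∀ (k : Int) (tangerine : List Int), Dom_solution k tangerine → Spec_solution k tangerine (solution k tangerine)

-- ===== LEMMAS AND PROOFS =====

-- the inner bucket loop behaves like A's greedy loop on a block of equal values
theorem bInner_eq_greedyA (n : Nat) (v : Int) :
    ∀ (k a : Int) (rest : List Int),
      greedyA k a (List.replicate n v ++ rest) =
        match bInner n v k a with
        | (true, _, a') => a'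
        | (false, k', a') => greedyA k' a' rest := by
  induction n with
  | zero => intro k a rest; simp [bInner]
  | succ m ih =>
      intro k a rest
      by_cases h : k ≤ 0
      · have hk : ¬ k > 0 := by omega
        simp [List.replicate_succ, greedyA, bInner, h, hk]
      · have hk : k > 0 := by omega
        simp only [List.replicate_succ, List.cons_append, greedyA, bInner, if_pos hk, if_neg h]
        exact ih (k - v) (a + 1) rest

-- the whole bucket walk is A's greedy loop run on the flattened bucket expansion
theorem bOuter_eq_greedyA (hist : PySem.Dict Int Int) :
    ∀ (vs : List Int) (k a : Int),
      bOuter vs hist k a =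
        greedyA k a (vs.flatMap (fun v => List.replicate (hist.getD v 0).toNat v)) := by
  intro vs
  induction vs with
  | nil => intro k a; simp [bOuter, greedyA]
  | cons v t ih =>
      intro k a
      rw [List.flatMap_cons, bInner_eq_greedyA]
      cases hb : bInner (hist.getD v 0).toNat v k a with
      | mk early p =>
          cases early
          · simp [bOuter, hb, ih]
          · simp [bOuter, hb]

-- occurrence counts in a flattened bucket expansion over a duplicate-free index list
theorem count_flatMap_replicate (f : Int → Nat) :
    ∀ (l : List Int), l.Nodup → ∀ a : Int,
      (l.flatMap (fun v => List.replicate (f v) v)).count a = if a ∈ l then f a else 0 := by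
  intro l
  induction l with
  | nil => intro _ a; simp
  | cons v t ih =>
      intro hnd a
      rcases List.nodup_cons.mp hnd with ⟨hv, hnt⟩
      rw [List.flatMap_cons, List.count_append, ih hnt a]
      by_cases hav : a = v
      · subst hav
        simp [hv]
      · have : List.count a (List.replicate (f v) v) = 0 := by
          rw [List.count_replicate]
          have : (v == a) = false := beq_eq_false_iff_ne.mpr (fun h => absurd h.symm hav)
          simp [this]
        simp [this, hav]

-- descending index lists flatten to a non-increasing expansion
theorem pairwise_flatMap_replicate (f : Int → Nat) :
    ∀ (l : List Int), l.Pairwise (fun a b => b < a) →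
      (l.flatMap (fun v => List.replicate (f v) v)).Pairwise (fun a b => b ≤ a) := by
  intro l
  induction l with
  | nil => intro _; simp
  | cons v t ih =>
      intro hp
      rcases List.pairwise_cons.mp hp with ⟨hvt, htp⟩
      rw [List.flatMap_cons]
      apply List.pairwise_append.mpr
      refine ⟨List.pairwise_replicate.mpr (Or.inr le_rfl), ih htp, ?_⟩
      intro x hx y hy
      have hxv : x = v := List.eq_of_mem_replicate hx
      rcases List.mem_flatMap.mp hy with ⟨w, hwt, hyw⟩
      have hyw' : y = w := List.eq_of_mem_replicate hyw
      have : w < v := hvt w hwt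
      omega

-- the values of Counter(xs) are the multiplicities of the distinct elements of xs
theorem counter_values (xs : List Int) :
    (PySem.Dict.counter xs).values = (PySem.Set.ofList xs).map (fun x => (List.count x xs : Int)) := by
  have h := PySem.Dict.items_counter xs
  calc (PySem.Dict.counter xs).values
      = (PySem.Dict.counter xs).items.map (·.2) := rfl
    _ = _ := by rw [h]; simp

-- every value of Counter(xs) is positive
theorem counter_values_pos (xs : List Int) :
    ∀ x ∈ (PySem.Dict.counter xs).values, 0 < x := by
  intro x hx
  rw [counter_values] at hx
  rcases List.mem_map.mp hx with ⟨y, hy, rfl⟩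
  have : y ∈ xs := (PySem.Set.mem_ofList xs y).mp hy
  have : 0 < List.count y xs := List.count_pos_iff.mpr this
  exact_mod_cast this

-- the countdown range mx..1 is strictly decreasing and duplicate-free
theorem pyRange_neg_one_sorted (a b : Int) :
    (PySem.List.pyRange a b (-1)).Pairwise (fun x y => y < x) ∧ (PySem.List.pyRange a b (-1)).Nodup := by
  rw [PySem.List.pyRange_neg_one_eq_reverse]
  constructor
  · exact List.pairwise_reverse.mpr (PySem.List.pairwise_lt_pyRange_one _ _)
  · exact (List.nodup_reverse).mpr (PySem.List.nodup_pyRange_one _ _)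

-- the bucket expansion IS sorted(counts, reverse=True)
theorem expansion_eq_sorted (counts : List Int) (hpos : ∀ x ∈ counts, 0 < x) :
    ((PySem.List.pyRange (PySem.List.maxD counts (fun x => x) 0) 0 (-1)).flatMap
      (fun v => List.replicate (List.count v counts) v)) =
    PySem.List.sorted counts (fun x => x) true := by
  set mx := PySem.List.maxD counts (fun x => x) 0 with hmx
  set rng := PySem.List.pyRange mx 0 (-1) with hrng
  obtain ⟨hdesc, hnd⟩ := pyRange_neg_one_sorted mx 0
  have hmem : ∀ x ∈ counts, x ∈ rng := by
    intro x hx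
    rw [hrng, PySem.List.mem_pyRange_neg_one]
    exact ⟨hpos x hx, PySem.List.le_maxD_id counts 0 x hx⟩
  have hperm : ((rng.flatMap (fun v => List.replicate (List.count v counts) v))).Perm counts := by
    apply List.perm_iff_count.mpr
    intro a
    rw [count_flatMap_replicate _ rng hnd a]
    by_cases ha : a ∈ rng
    · simp [ha]
    · have : a ∉ counts := fun hc => ha (hmem a hc)
      simp [ha, List.count_eq_zero.mpr this]
  have hp1 : ((rng.flatMap (fun v => List.replicate (List.count v counts) v))).Pairwise
      (fun a b => b ≤ a) := pairwise_flatMap_replicate _ rng hdesc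
  have hp2 := PySem.List.sorted_pairwise_rev counts (fun x => x)
  have hperm2 : ((rng.flatMap (fun v => List.replicate (List.count v counts) v))).reverse.Perm
      (PySem.List.sorted counts (fun x => x) true).reverse :=
    ((List.reverse_perm _).trans (hperm.trans (PySem.List.sorted_perm counts (fun x => x) true).symm)).trans
      (List.reverse_perm _).symm
  have heq := PySem.List.eq_of_perm_of_pairwise_le_of_injective (fun x : Int => x)
    (fun a b h => h) hperm2 (List.pairwise_reverse.mpr hp1) (List.pairwise_reverse.mpr hp2)
  exact List.reverse_inj.mp heq

-- ===== VERDICT (by name: the statement is the Claim_ definition above) =====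
theorem solution_spec : Claim_equal_solution := by
  intro k t _
  show solution k t = solution_alt k t
  unfold solution solution_alt
  rw [bOuter_eq_greedyA]
  have hfun : (fun v => List.replicate (((PySem.Dict.counter (PySem.Dict.counter t).values).getD v 0)).toNat v)
      = (fun v => List.replicate (List.count v (PySem.Dict.counter t).values) v) := by
    funext v; rw [PySem.Dict.getD_counter]; simp
  rw [hfun, expansion_eq_sorted (PySem.Dict.counter t).values (counter_values_pos t)]
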